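-- pv_equiv track=rewrite | github.com/esraaelelimy/gtd_algos | gtd_algos/src/utils/plotting_utils.py | filter_non_completed_runs_based_on_env_steps
-- ===== SOURCE A (Python) =====
-- def filter_non_completed_runs_based_on_env_steps(results, min_steps=4_500_000):
--     filtered_results = {k: [] for k in results}
--     for i in range(len(results['env_steps'])):
--         final_step = results['env_steps'][i][-1]
--         if final_step >= min_steps:
--             for key in results:
--                 filtered_results[key].append(results[key][i])
--     num_runs_used = len(filtered_results['env_steps'])
--     return filtered_results, num_runs_used
-- ===== SOURCE B (Python) =====
-- def filter_non_completed_runs_based_on_env_steps(results, min_steps=4_500_000):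
--     # Row-major strategy: transpose the columns into per-run records with zip,
--     # filter whole records by their env_steps entry, and transpose back.
--     keys = list(results)
--     rows = list(zip(*(results[k] for k in keys)))
--     es_pos = keys.index('env_steps')
--     kept_rows = [row for row in rows if row[es_pos][-1] >= min_steps]
--     cols = list(zip(*kept_rows)) if kept_rows else [() for _ in keys]
--     filtered_results = {k: list(col) for k, col in zip(keys, cols)}
--     return filtered_results, len(kept_rows)
-- ===== Notes on version B (the rewrite author's own statement) =====
-- stated objective: alternative
-- what changed: A builds the filtered dict column-major, appending run i's entry to every key's list inside the index loop; B transposes the columns into per-run record tuples with zip, filters whole records once by their env_steps field, and transposes the surviving records back into columns.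
import Mathlib
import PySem

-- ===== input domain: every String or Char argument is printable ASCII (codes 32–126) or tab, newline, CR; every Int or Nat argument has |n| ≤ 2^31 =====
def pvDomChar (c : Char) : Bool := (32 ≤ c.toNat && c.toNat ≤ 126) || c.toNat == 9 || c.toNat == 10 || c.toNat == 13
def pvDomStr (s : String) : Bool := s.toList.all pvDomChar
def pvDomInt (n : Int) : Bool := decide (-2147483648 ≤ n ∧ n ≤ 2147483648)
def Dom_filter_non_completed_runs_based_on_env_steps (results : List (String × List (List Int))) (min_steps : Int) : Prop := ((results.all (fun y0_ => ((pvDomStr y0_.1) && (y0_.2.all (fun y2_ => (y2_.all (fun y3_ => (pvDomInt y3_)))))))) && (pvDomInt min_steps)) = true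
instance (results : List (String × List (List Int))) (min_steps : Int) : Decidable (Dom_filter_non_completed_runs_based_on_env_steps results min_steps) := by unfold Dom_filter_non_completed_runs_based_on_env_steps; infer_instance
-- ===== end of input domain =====

-- B replaces A's column-major append loop by a row-major strategy: transpose the columns
-- into per-run record tuples with zip, filter whole records once, transpose back
-- (objective: alternative; same asymptotic cost, different data representation).

-- ===== PORT A =====
-- dicts are the assoc lists of the signature, wrapped in PySem.Dict for the lookups.
def filter_non_completed_runs_based_on_env_steps (results : List (String × List (List Int))) (min_steps : Int) : (List (String × List (List Int))) × Int :=
  let r : PySem.Dict String (List (List Int)) := PySem.Dict.mk results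
  -- filtered_results = {k: [] for k in results}
  let filtered := r.keys.foldl (fun d k => d.insert k ([] : List (List Int))) PySem.Dict.empty
  let es := (r.get? "env_steps").getD []      -- results['env_steps']; Pre_ excludes the KeyError
  -- for i in range(len(results['env_steps'])): …
  let filtered := (List.range es.length).foldl (fun d i =>
    let final_step := (PySem.List.pyGet? (es.getD i []) (-1)).getD 0   -- […][-1]; Pre_ excludes the IndexError
    if min_steps ≤ final_step then
      -- for key in results: filtered_results[key].append(results[key][i])
      r.keys.foldl (fun d key => d.modify key [] (fun l => l ++ [(r.getD key []).getD i []])) d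
    else d) filtered
  (filtered.items, (((filtered.get? "env_steps").getD []).length : Int))

-- ===== PORT B =====
-- pvZip ports Python's builtin zip(*cols): rows up to the shortest column's length.
def pvZip (cols : List (List (List Int))) : List (List (List Int)) :=
  match cols with
  | [] => []
  | c :: cs =>
    let m := cs.foldl (fun a c' => min a c'.length) c.length
    (List.range m).map (fun j => (c :: cs).map (fun col => col.getD j []))

def filter_non_completed_runs_based_on_env_steps_alt (results : List (String × List (List Int))) (min_steps : Int) : (List (String × List (List Int))) × Int :=
  let r : PySem.Dict String (List (List Int)) := PySem.Dict.mk results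
  let keys := r.keys
  let rows := pvZip (keys.map (fun k => r.getD k []))
  let es_pos := (PySem.List.index? keys "env_steps").getD 0   -- ValueError excluded by Pre_
  let kept := rows.filter (fun row => decide (min_steps ≤ (PySem.List.pyGet? (row.getD es_pos []) (-1)).getD 0))
  let cols := if kept.isEmpty then keys.map (fun _ => ([] : List (List Int))) else pvZip kept
  (keys.zip cols, (kept.length : Int))

-- ===== PRECONDITION & SPEC =====
-- Pre_ excludes exactly the inputs on which the Python A raises: a missing 'env_steps'
-- key (KeyError), an empty run in env_steps (IndexError on [-1]), or a key whose column
-- is too short at a surviving index (IndexError); duplicate keys are also excluded since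
-- they cannot occur in a Python dict.
def Pre_filter_non_completed_runs_based_on_env_steps (results : List (String × List (List Int))) (min_steps : Int) : Prop :=
  (results.map Prod.fst).Nodup ∧
  ((PySem.Dict.mk results).get? "env_steps").isSome = true ∧
  (∀ run ∈ ((PySem.Dict.mk results).get? "env_steps").getD [], run ≠ []) ∧
  (∀ i < (((PySem.Dict.mk results).get? "env_steps").getD []).length,
     min_steps ≤ (PySem.List.pyGet? ((((PySem.Dict.mk results).get? "env_steps").getD []).getD i []) (-1)).getD 0 →
     ∀ kv ∈ results, i < kv.2.length)
instance (results : List (String × List (List Int))) (min_steps : Int) : Decidable (Pre_filter_non_completed_runs_based_on_env_steps results min_steps) := by unfold Pre_filter_non_completed_runs_based_on_env_steps; infer_instance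

def pvWitness_filter_non_completed_runs_based_on_env_steps : (List (String × List (List Int))) × Int :=
  ([("env_steps", [[5]]), ("returns", [[1]])], 3)

def Spec_filter_non_completed_runs_based_on_env_steps (results : List (String × List (List Int))) (min_steps : Int) (out : (List (String × List (List Int))) × Int) : Prop := out = filter_non_completed_runs_based_on_env_steps_alt results min_steps
instance (results : List (String × List (List Int))) (min_steps : Int) (out : (List (String × List (List Int))) × Int) : Decidable (Spec_filter_non_completed_runs_based_on_env_steps results min_steps out) := by unfold Spec_filter_non_completed_runs_based_on_env_steps; infer_instance

-- ===== CLAIM (what is proved, stated in full; the proofs are below) =====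
def Claim_equal_filter_non_completed_runs_based_on_env_steps : Prop := ∀ (results : List (String × List (List Int))) (min_steps : Int), Dom_filter_non_completed_runs_based_on_env_steps results min_steps → Pre_filter_non_completed_runs_based_on_env_steps results min_steps → Spec_filter_non_completed_runs_based_on_env_steps results min_steps (filter_non_completed_runs_based_on_env_steps results min_steps)

-- ===== LEMMAS AND PROOFS =====

-- the common canonical value both ports are reduced to
def pvES (results : List (String × List (List Int))) : List (List Int) :=
  ((PySem.Dict.mk results).get? "env_steps").getD []

def pvPb (results : List (String × List (List Int))) (min_steps : Int) (i : Nat) : Bool :=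
  decide (min_steps ≤ (PySem.List.pyGet? ((pvES results).getD i []) (-1)).getD 0)

def pvKeep (results : List (String × List (List Int))) (min_steps : Int) : List Nat :=
  (List.range (pvES results).length).filter (pvPb results min_steps)

def pvCanon (results : List (String × List (List Int))) (min_steps : Int) : (List (String × List (List Int))) × Int :=
  (results.map (fun kv => (kv.1, (pvKeep results min_steps).map (fun i => kv.2.getD i []))),
   ((pvKeep results min_steps).length : Int))

-- ---- A-side lemmas ----
theorem pv_getD_foldl_modify_not_mem (ks : List String)
    (g : String → List (List Int) → List (List Int))
    (d : PySem.Dict String (List (List Int))) (k : String) (hk : k ∉ ks) :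
    (ks.foldl (fun d k' => d.modify k' [] (g k')) d).getD k [] = d.getD k [] := by
  induction ks generalizing d with
  | nil => rfl
  | cons a t ih =>
    simp only [List.foldl_cons]
    rw [ih _ (fun h => hk (List.mem_cons_of_mem _ h))]
    exact PySem.Dict.getD_modify_of_ne _ _ _ (fun h => hk (h ▸ List.mem_cons_self))

theorem pv_getD_foldl_modify_mem (ks : List String) (hnd : ks.Nodup)
    (g : String → List (List Int) → List (List Int))
    (k : String) (hk : k ∈ ks) (d : PySem.Dict String (List (List Int))) :
    (ks.foldl (fun d k' => d.modify k' [] (g k')) d).getD k [] = g k (d.getD k []) := by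
  induction ks generalizing d with
  | nil => cases hk
  | cons a t ih =>
    simp only [List.foldl_cons]
    rcases List.mem_cons.mp hk with h | h
    · subst h
      rw [pv_getD_foldl_modify_not_mem t g _ k (List.Nodup.notMem hnd)]
      exact PySem.Dict.getD_modify_self _ _ _ _
    · rw [ih (List.Nodup.of_cons hnd) h]
      have hne : k ≠ a := fun he => (List.Nodup.notMem hnd) (he ▸ h)
      rw [PySem.Dict.getD_modify_of_ne _ _ _ hne]

theorem pv_keys_foldl_modify_self (ks : List String)
    (g : String → List (List Int) → List (List Int))
    (d : PySem.Dict String (List (List Int))) (hd : d.keys = ks) :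
    (ks.foldl (fun d k' => d.modify k' [] (g k')) d).keys = ks := by
  rw [PySem.Dict.keys_foldl_modify ks [] (fun _ k' v => g k' v) d, hd,
      PySem.Set.update_eq_append_filter]
  have : List.filter (fun y => !PySem.Set.contains ks y) (PySem.Set.ofList ks) = [] := by
    apply List.filter_eq_nil_iff.mpr
    intro y hy
    have hm : y ∈ ks := (PySem.Set.mem_ofList ks y).mp hy
    simp [PySem.Set.contains, hm]
  rw [this, List.append_nil]

theorem pv_getD_foldl_insert_nil (ks : List String)
    (d : PySem.Dict String (List (List Int))) (k : String)
    (hd : d.getD k [] = []) :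
    (ks.foldl (fun d k' => d.insert k' ([] : List (List Int))) d).getD k [] = [] := by
  induction ks generalizing d with
  | nil => exact hd
  | cons a t ih =>
    simp only [List.foldl_cons]
    apply ih
    rw [PySem.Dict.getD_insert]
    split <;> simp [hd]

theorem pv_keys_main (ks : List String) (p : Nat → Prop) [DecidablePred p]
    (g : Nat → String → List Int) (I : List Nat)
    (d : PySem.Dict String (List (List Int))) (hd : d.keys = ks) :
    (I.foldl (fun d i =>
        if p i then ks.foldl (fun d k' => d.modify k' [] (fun l => l ++ [g i k'])) d
        else d) d).keys = ks := by
  induction I generalizing d with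
  | nil => exact hd
  | cons i t ih =>
    simp only [List.foldl_cons]
    apply ih
    by_cases hp : p i
    · rw [if_pos hp]
      exact pv_keys_foldl_modify_self ks _ d hd
    · rw [if_neg hp]; exact hd

theorem pv_main_fold (ks : List String) (hnd : ks.Nodup) (p : Nat → Prop) [DecidablePred p]
    (g : Nat → String → List Int) (k : String) (hk : k ∈ ks)
    (I : List Nat) (d : PySem.Dict String (List (List Int))) :
    (I.foldl (fun d i =>
        if p i then ks.foldl (fun d k' => d.modify k' [] (fun l => l ++ [g i k'])) d
        else d) d).getD k []
      = d.getD k [] ++ (I.filter (fun i => decide (p i))).map (fun i => g i k) := by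
  induction I generalizing d with
  | nil => simp
  | cons i t ih =>
    simp only [List.foldl_cons, List.filter_cons]
    by_cases hp : p i
    · rw [if_pos hp, ih, pv_getD_foldl_modify_mem ks hnd _ k hk]
      simp [hp]
    · rw [if_neg hp, ih]
      simp [hp]

theorem pv_A_canon (results : List (String × List (List Int))) (min_steps : Int)
    (hpre : Pre_filter_non_completed_runs_based_on_env_steps results min_steps) :
    filter_non_completed_runs_based_on_env_steps results min_steps = pvCanon results min_steps := by
  obtain ⟨hnd, hsome, _hruns, _hlen⟩ := hpre
  unfold filter_non_completed_runs_based_on_env_steps pvCanon pvKeep pvPb pvES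
  simp only []
  set r : PySem.Dict String (List (List Int)) := PySem.Dict.mk results with hr
  set es : List (List Int) := (r.get? "env_steps").getD [] with hes
  set p : Nat → Prop := fun i => min_steps ≤ (PySem.List.pyGet? (es.getD i []) (-1)).getD 0 with hp
  set g : Nat → String → List Int := fun i k => (r.getD k []).getD i [] with hg
  have hkeq : r.keys = results.map Prod.fst := rfl
  have hndk : r.keys.Nodup := by rw [hkeq]; exact hnd
  set d0 : PySem.Dict String (List (List Int)) :=
    r.keys.foldl (fun d k => d.insert k ([] : List (List Int))) PySem.Dict.empty with hd0
  have hd0keys : d0.keys = r.keys := by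
    rw [hd0, PySem.Dict.keys_foldl_insert r.keys (fun _ _ => []) PySem.Dict.empty]
    have : (PySem.Dict.empty : PySem.Dict String (List (List Int))).keys = [] := rfl
    rw [this, PySem.Set.update_nil_left, PySem.Set.ofList_eq_self_of_nodup _ hndk]
  have hd0getD : ∀ k, d0.getD k [] = [] := fun k =>
    pv_getD_foldl_insert_nil r.keys PySem.Dict.empty k (PySem.Dict.getD_empty k [])
  set F := fun (d : PySem.Dict String (List (List Int))) (i : Nat) =>
    if min_steps ≤ (PySem.List.pyGet? (es.getD i []) (-1)).getD 0 then
      r.keys.foldl (fun d key => d.modify key [] (fun l => l ++ [(r.getD key []).getD i []])) d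
    else d with hF
  set dF := (List.range es.length).foldl F d0 with hdF
  have hFeq : F = fun d i =>
      if p i then r.keys.foldl (fun d k' => d.modify k' [] (fun l => l ++ [g i k'])) d
      else d := rfl
  have hgetD : ∀ k ∈ r.keys, dF.getD k []
      = ((List.range es.length).filter (fun i => decide (p i))).map (fun i => g i k) := by
    intro k hk
    rw [hdF, hFeq, pv_main_fold r.keys hndk p g k hk, hd0getD, List.nil_append]
  have hkeysF : dF.keys = r.keys := by
    rw [hdF, hFeq]
    exact pv_keys_main r.keys p g _ d0 hd0keys
  have hndF : dF.keys.Nodup := by rw [hkeysF]; exact hndk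
  set keep := (List.range es.length).filter (fun i => decide (p i)) with hkeep
  have hmem : "env_steps" ∈ r.keys := by
    by_contra hmem
    rw [← PySem.Dict.get?_eq_none_iff_not_mem_keys] at hmem
    rw [hmem] at hsome
    simp at hsome
  refine Prod.ext_iff.mpr ⟨?_, ?_⟩
  · -- items
    rw [PySem.Dict.items_eq_map_keys dF hndF [], hkeysF, hkeq, List.map_map]
    apply List.map_congr_left
    intro kv hkv
    have hkmem : kv.1 ∈ r.keys := by rw [hkeq]; exact List.mem_map_of_mem hkv
    have hv : r.getD kv.1 [] = kv.2 :=
      PySem.Dict.getD_of_mem_items r (by exact hkv) hndk []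
    simp only [Function.comp]
    rw [hgetD kv.1 hkmem]
    congr 1
    apply List.map_congr_left
    intro i _
    rw [hg]
    simp only []
    rw [hv]
  · -- count
    rw [← PySem.Dict.getD_eq_get?_getD, hgetD "env_steps" hmem]
    simp [hkeep]

-- ---- B-side lemmas ----
theorem pv_foldMin_le (cs : List (List (List Int))) (a : Nat) :
    cs.foldl (fun a c' => min a c'.length) a ≤ a ∧
      ∀ x ∈ cs, cs.foldl (fun a c' => min a c'.length) a ≤ x.length := by
  induction cs generalizing a with
  | nil => exact ⟨le_refl a, by intro x hx; cases hx⟩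
  | cons c t ih =>
    refine ⟨?_, ?_⟩
    · exact le_trans (ih (min a c.length)).1 (min_le_left _ _)
    · intro x hx
      rcases List.mem_cons.mp hx with h | h
      · subst h; exact le_trans (ih (min a x.length)).1 (min_le_right _ _)
      · exact (ih (min a c.length)).2 x h

theorem pv_le_foldMin (cs : List (List (List Int))) (a n : Nat)
    (h1 : n ≤ a) (h2 : ∀ x ∈ cs, n ≤ x.length) :
    n ≤ cs.foldl (fun a c' => min a c'.length) a := by
  induction cs generalizing a with
  | nil => exact h1
  | cons c t ih =>
    exact ih (min a c.length) (le_min h1 (h2 c List.mem_cons_self))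
      (fun x hx => h2 x (List.mem_cons_of_mem _ hx))

theorem pv_B_canon (results : List (String × List (List Int))) (min_steps : Int)
    (hpre : Pre_filter_non_completed_runs_based_on_env_steps results min_steps) :
    filter_non_completed_runs_based_on_env_steps_alt results min_steps = pvCanon results min_steps := by
  obtain ⟨hnd, hsome, _hruns, hlen⟩ := hpre
  unfold filter_non_completed_runs_based_on_env_steps_alt pvCanon
  simp only []
  set r : PySem.Dict String (List (List Int)) := PySem.Dict.mk results with hr
  have hkeq : r.keys = results.map Prod.fst := rfl
  have hndk : r.keys.Nodup := by rw [hkeq]; exact hnd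
  set cols0 := r.keys.map (fun k => r.getD k []) with hcols0
  have hmem : "env_steps" ∈ r.keys := by
    by_contra hmem
    rw [← PySem.Dict.get?_eq_none_iff_not_mem_keys] at hmem
    rw [hmem] at hsome
    simp at hsome
  have hcolsvals : cols0 = results.map (fun kv => kv.2) := by
    rw [hcols0, hkeq, List.map_map]
    apply List.map_congr_left
    intro kv hkv
    simp only [Function.comp]
    exact PySem.Dict.getD_of_mem_items r hkv hndk []
  have hesr : pvES results = r.getD "env_steps" [] := by
    rw [pvES, PySem.Dict.getD_eq_get?_getD]
  have hesmem : pvES results ∈ cols0 := by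
    rw [hcols0, hesr]; exact List.mem_map_of_mem hmem
  obtain ⟨c, cs, hcc⟩ : ∃ c cs, cols0 = c :: cs := by
    cases h : cols0 with
    | nil => rw [h] at hesmem; cases hesmem
    | cons c cs => exact ⟨c, cs, rfl⟩
  set m := cs.foldl (fun a c' => min a c'.length) c.length with hm
  have hrows : pvZip cols0 = (List.range m).map (fun j => cols0.map (fun col => col.getD j [])) := by
    rw [hcc]; simp only [pvZip]; rw [← hm]
  have hmle : ∀ x ∈ cols0, m ≤ x.length := by
    rw [hcc]; intro x hx
    rcases List.mem_cons.mp hx with h | h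
    · subst h; exact (pv_foldMin_le cs x.length).1
    · exact (pv_foldMin_le cs c.length).2 x h
  have hm_le_es : m ≤ (pvES results).length := hmle _ hesmem
  have hkeeplt : ∀ i ∈ pvKeep results min_steps, i < m := by
    intro i hi
    rw [pvKeep, List.mem_filter, List.mem_range] at hi
    obtain ⟨hilt, hip⟩ := hi
    have hall : ∀ kv ∈ results, i < kv.2.length :=
      hlen i hilt (of_decide_eq_true hip)
    have : i + 1 ≤ m := by
      rw [hm]
      have hc : ∀ x ∈ cols0, i + 1 ≤ x.length := by
        rw [hcolsvals]
        intro x hx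
        obtain ⟨kv, hkv, hxe⟩ := List.mem_map.mp hx
        exact hxe ▸ hall kv hkv
      exact pv_le_foldMin cs c.length (i+1) (hc c (hcc ▸ List.mem_cons_self))
        (fun x hx => hc x (hcc ▸ List.mem_cons_of_mem _ hx))
    omega
  -- the env_steps position
  obtain ⟨t0, ht0⟩ : ∃ t0, PySem.List.index? r.keys "env_steps" = some t0 := by
    have := (PySem.List.index?_isSome_iff r.keys "env_steps").mpr hmem
    exact Option.isSome_iff_exists.mp this
  obtain ⟨ht0lt, ht0get, _⟩ := PySem.List.getElem_of_index?_eq_some ht0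
  have hlencols : cols0.length = r.keys.length := by rw [hcols0, List.length_map]
  have hcolt0 : cols0.getD t0 [] = pvES results := by
    have h' : t0 < (List.map (fun k => r.getD k []) r.keys).length := by
      rw [List.length_map]; exact ht0lt
    calc cols0.getD t0 [] = (List.map (fun k => r.getD k []) r.keys).getD t0 [] := rfl
      _ = (List.map (fun k => r.getD k []) r.keys)[t0]'h' := List.getD_eq_getElem _ _ h'
      _ = r.getD (r.keys[t0]'ht0lt) [] := List.getElem_map _
      _ = pvES results := by rw [ht0get, hesr]
  have hpredrow : ∀ j, (decide (min_steps ≤ (PySem.List.pyGet? (((cols0.map (fun col => col.getD j [])).getD ((PySem.List.index? r.keys "env_steps").getD 0) []) : List Int) (-1)).getD 0))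
      = pvPb results min_steps j := by
    intro j
    rw [ht0]
    have h1 : (cols0.map (fun col => col.getD j [])).getD ((some t0).getD 0) [] = (pvES results).getD j [] := by
      simp only [Option.getD_some]
      rw [List.getD_eq_getElem _ [] (by rw [List.length_map]; exact hlencols ▸ ht0lt)]
      rw [List.getElem_map]
      rw [← List.getD_eq_getElem cols0 [] (hlencols ▸ ht0lt), hcolt0]
    rw [h1, pvPb]
  have hkept : (pvZip cols0).filter (fun row => decide (min_steps ≤ (PySem.List.pyGet? (row.getD ((PySem.List.index? r.keys "env_steps").getD 0) []) (-1)).getD 0))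
      = (pvKeep results min_steps).map (fun j => cols0.map (fun col => col.getD j [])) := by
    rw [hrows, List.filter_map]
    congr 1
    have hfc : (List.range m).filter
        ((fun row => decide (min_steps ≤ (PySem.List.pyGet? (row.getD ((PySem.List.index? r.keys "env_steps").getD 0) []) (-1)).getD 0)) ∘ (fun j => cols0.map (fun col => col.getD j [])))
        = (List.range m).filter (pvPb results min_steps) := by
      apply List.filter_congr
      intro j _
      exact hpredrow j
    rw [hfc, pvKeep]
    have hsplit : (pvES results).length = m + ((pvES results).length - m) := by omega
    rw [hsplit, List.range_add, List.filter_append]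
    have h2 : ((List.range ((pvES results).length - m)).map (m + ·)).filter (pvPb results min_steps) = [] := by
      apply List.filter_eq_nil_iff.mpr
      intro x hx
      obtain ⟨j, hj, hxe⟩ := List.mem_map.mp hx
      rw [List.mem_range] at hj
      intro hpx
      have hxk : x ∈ pvKeep results min_steps := by
        rw [pvKeep, List.mem_filter, List.mem_range]
        exact ⟨by omega, hpx⟩
      have := hkeeplt x hxk
      omega
    rw [h2, List.append_nil]
  rw [hkept]
  set kept := (pvKeep results min_steps).map (fun j => cols0.map (fun col => col.getD j [])) with hkeptdef
  have hkeptrowlen : ∀ row ∈ kept, row.length = r.keys.length := by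
    intro row hrow
    obtain ⟨j, _, hje⟩ := List.mem_map.mp hrow
    rw [← hje, List.length_map, hlencols]
  have hcolsfin : (if kept.isEmpty then r.keys.map (fun _ => ([] : List (List Int))) else pvZip kept)
      = (List.range r.keys.length).map (fun t => kept.map (fun row => row.getD t [])) := by
    by_cases hk : kept.isEmpty
    · rw [if_pos hk]
      rw [List.isEmpty_iff.mp hk]
      simp [List.map_const']
    · rw [if_neg hk]
      obtain ⟨k0, ks, hkk⟩ : ∃ k0 ks, kept = k0 :: ks := by
        cases h : kept with
        | nil => rw [h] at hk; simp at hk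
        | cons k0 ks => exact ⟨k0, ks, rfl⟩
      rw [hkk]
      simp only [pvZip]
      have hm2 : ks.foldl (fun a c' => min a c'.length) k0.length = r.keys.length := by
        have hall : ∀ row ∈ kept, row.length = r.keys.length := hkeptrowlen
        rw [hkk] at hall
        apply le_antisymm
        · exact le_trans (pv_foldMin_le ks k0.length).1
            (le_of_eq (hall k0 List.mem_cons_self))
        · exact pv_le_foldMin ks k0.length r.keys.length
            (by rw [hall k0 List.mem_cons_self])
            (fun x hx => by rw [hall x (List.mem_cons_of_mem _ hx)])
      rw [hm2, ← hkk]
  rw [hcolsfin]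
  refine Prod.ext_iff.mpr ⟨?_, ?_⟩
  · -- the assoc list
    apply List.ext_getElem
    · rw [List.length_zip, List.length_map, List.length_range, List.length_map, hkeq,
          List.length_map]
      omega
    · intro t h1 h2
      have htk : t < r.keys.length := by
        rw [List.length_zip, List.length_map, List.length_range] at h1
        omega
      have htres : t < results.length := by
        have h' := hkeq ▸ htk
        rw [List.length_map] at h'
        exact h'
      rw [List.getElem_zip]
      have hrhs : (List.map (fun kv => (kv.1, List.map (fun i => kv.2.getD i []) (pvKeep results min_steps))) results)[t]'h2
          = (results[t].1, List.map (fun i => results[t].2.getD i []) (pvKeep results min_steps)) := List.getElem_map _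
      rw [hrhs]
      refine Prod.ext ?_ ?_
      · show r.keys[t]'htk = results[t].1
        simp only [hkeq, List.getElem_map]
      · show ((List.range r.keys.length).map (fun t => kept.map (fun row => row.getD t [])))[t]'(by
            rw [List.length_map, List.length_range]; exact htk) = _
        simp only [List.getElem_map, List.getElem_range]
        rw [hkeptdef, List.map_map]
        apply List.map_congr_left
        intro i _
        simp only [Function.comp]
        rw [List.getD_eq_getElem _ [] (by rw [List.length_map]; exact hlencols ▸ htk)]
        rw [List.getElem_map]
        simp only [hcolsvals, List.getElem_map]
  · -- the count
    rw [hkeptdef, List.length_map]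

-- ===== VERDICT (by name: the statement is the Claim_ definition above) =====
theorem filter_non_completed_runs_based_on_env_steps_spec : Claim_equal_filter_non_completed_runs_based_on_env_steps := by
  intro results min_steps _hdom hpre
  unfold Spec_filter_non_completed_runs_based_on_env_steps
  rw [pv_A_canon results min_steps hpre, pv_B_canon results min_steps hpre]
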